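/- GENERATED by tools/from_farm_form.py from prooffarm-gif/accepted/GifAddExtensionBlock.3/Lemmas.lean (a worked proof of the farm's unit `GifAddExtensionBlock.3`,
   accepted by the verdict) — do not edit. -/
import Gif.Spec.Units.GifAddExtensionBlock_3
import Gif.Spec.AllSegs

/-!
  Lemmas for the unit `GifAddExtensionBlock.3` (segment 3 of `GifAddExtensionBlock`, 107C05H … 107C24H and 107C5CH … 107C6AH;
  gifalloc.c l.256-264): `Bytes == NULL` → GIF_ERROR; otherwise `memcpy(Bytes, ExtData, Len)` into the new data object, GIF_OK.
  THE MODEL OF A `memcpy` INTO AN OBJECT THE FOREST ALREADY OWNS: the heap and the forest do not change; the destination is a data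
  object (`Loose.data`, `HeapWin.live`), the source lies in pv, the two are apart (`GifOK.data_far_pv`).

  THE WALK, one lemma per arm of the assertion's own disjunction (`AfterBytes.rbp`, split BEFORE the walk in Proof.lean):
      gab3_null               107C05H → 107C4DH    `rbp == NULL` (`malloc(Len)` failed): GIF_ERROR, nothing written
      gab3_copy               107C05H → 107C4DH    `memcpy(rbp, r13, r12d)`: the source in `pv.Buf`, the destination the new data object
  From the tree: `GifAddExtensionBlock.AfterBytes.frame_carry`, `GifOK.pv_where`, `GifOK.data_far_pv` (Gif/Spec/AllocCarry.lean),
  `cnt32_zext` (Words2.lean), `Asan.Heap.Live.range` (HeapCarry.lean).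
-/

open X86 X86.User Asan ProgX.Base ProgX.Base.Spec Gif.Spec

set_option maxRecDepth 4000
set_option maxHeartbeats 4000000

namespace Gif.Spec.GifAddExtensionBlock_3

/-- **107C05H, 107C5CH → 107C4DH** (l.256-257 `if (ep->Bytes == NULL) return GIF_ERROR`): `rbp = 0` (`malloc(Len)` failed; the counted
block has `bytes = 0`, the state invariant holds: design F-2), `eax = 0`. Nothing is written: every clause of `Done` is the cut's. -/
theorem gab3_null (Lay : Layout) (hLay : Lay.hi = 0x1000000) (μ : Microarch) (hμ : UserX.MicroOK μ) (u₀ : State)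
    (hcode : HasCodeNat Lay u₀ Gif.L.GifAddExtensionBlock.entry Gif.Code.code_GifAddExtensionBlock.nat
      Gif.L.GifAddExtensionBlock.size)
    (H : Heap) (rest : List Obj) (frames : List (Nat × FrameLayout)) (F : Forest) (R : Rd) (len : Nat) (Hc : Heap) (Fc : Forest)
    (e : State) (ret : Word) (v : State)
    (hat : GifAddExtensionBlock.AfterBytes H rest frames F R len Hc Fc u₀ e ret v) (hnull : (v.reg .rbp).toNat = 0) :
    ReachVia Lay μ ProgX.Base.WayInv v (GifAddExtensionBlock.Done H rest frames F R len Hc Fc u₀ e ret) := by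
  -- 1. the entry state's facts; the present state
  have he := hat.entry
  v_entry he
  have w_rip := hat.rip
  have c_rsp : v.reg .rsp = e.reg .rsp - 56 := hat.rsp
  have c_rbp : v.reg .rbp = 0 := UInt64.toNat_inj.mp hnull
  have w_eq : Mem.EqOn ProgX.Base.L.textLo ProgX.Base.L.textHi u₀.mem v.mem := ProgX.Base.conv_code_eqOn hat.code
  have hdf : v.flags .df = false := (show abiInv _ from hat.abi).1
  have hmx : v.mxcsr &&& 0x1F80 = 0x1F80 := (show abiInv _ from hat.abi).2
  have hsse := ProgX.Base.sseOK_of_abiInv hat.abi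
  have w_kept : RegsKept [.rsp] v v := RegsKept.refl _ _
  -- 2. the walk: the arm `rbp != NULL` is pruned
  u_walk hcode [hμ.vendor] until [Gif.L.GifAddExtensionBlock.at_107c4d]
    span [ProgX.Base.L.textLo, ProgX.Base.L.textHi] side (v_side)
  -- 3. 107C4DH: `Done`; the memory is the cut's
  have habi : (conv u₀).inv s_107c61 := by v_inv
  refine ReachVia.done ⟨hat.entry, hat.pre, w_rip, w_rsp, ?_, ?_, ?_, ?_, ?_, ?_, ?_, ?_, hat.region, hat.sameBut, ?_, ?_, ?_, ?_,
    ProgX.Base.conv_code_in w_eq, habi⟩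
  · -- GIF_ERROR
    right
    rw [w_rax]
    decide
  · rw [w_mem]
    exact hat.slot_r15
  · rw [w_mem]
    exact hat.slot_r14
  · rw [w_mem]
    exact hat.slot_r13
  · rw [w_mem]
    exact hat.slot_r12
  · rw [w_mem]
    exact hat.slot_rbp
  · rw [w_mem]
    exact hat.slot_rbx
  · rw [w_mem]
    exact hat.slot_ra
  · rw [w_mem]
    exact hat.inv
  · rw [w_mem]
    exact hat.ok
  · rw [w_mem]
    exact hat.rem
  · rw [w_mem]
    exact hat.same

/-- **107C05H … 107C18H, `call memcpy`, 107C1DH → 107C4DH** (l.256-264): `rbp = Bytes` is the new data object `(b, Len)` of the forest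
(not NULL: a live heap object), `r13 = ExtData` points into `pv.Buf` (not NULL). `memcpy(Bytes, ExtData, Len)`: the source is
live (inside pv), the destination is the whole data object, no overlap (`GifOK.data_far_pv`). Its footprint — the data object,
80 bytes of stack — keeps the heap's invariant (`HeapInv.sameExcept`, `HeapWin.live`) and the state invariant
(`GifOK.sameExcept`, `Loose.data`, `Loose.stack`). GIF_OK. -/
theorem gab3_copy (Lay : Layout) (hLay : Lay.hi = 0x1000000) (μ : Microarch) (hμ : UserX.MicroOK μ) (u₀ : State)
    (hcode : HasCodeNat Lay u₀ Gif.L.GifAddExtensionBlock.entry Gif.Code.code_GifAddExtensionBlock.nat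
      Gif.L.GifAddExtensionBlock.size)
    (h_memcpy : ∀ (others : List Obj) (frames : List (Nat × FrameLayout)),
      Calls Lay μ ProgX.Base.WayInv (ProgX.Base.conv u₀) ProgX.Base.L.memcpy.entry (ProgX.Base.Spec.memcpy.spec others frames))
    (H : Heap) (rest : List Obj) (frames : List (Nat × FrameLayout)) (F : Forest) (R : Rd) (len : Nat) (Hc : Heap) (Fc : Forest)
    (e : State) (ret : Word) (v : State)
    (hat : GifAddExtensionBlock.AfterBytes H rest frames F R len Hc Fc u₀ e ret v)
    (hdata : ((v.reg .rbp).toNat, len) ∈ Fc.datas) :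
    ReachVia Lay μ ProgX.Base.WayInv v (GifAddExtensionBlock.Done H rest frames F R len Hc Fc u₀ e ret) := by
  -- 1. the entry state's facts
  have he := hat.entry
  v_entry he
  have henv : Env H rest frames F R e := hat.pre.1
  have hlen1 : 1 ≤ len := hat.pre.2.2.2.2.1
  have hlen2 : len ≤ 255 := hat.pre.2.2.2.2.2.1
  have hr8lo : F.pv + 88 ≤ (e.reg .r8).toNat := hat.pre.2.2.2.2.2.2.1
  have hr8hi : (e.reg .r8).toNat + len ≤ F.pv + 344 := hat.pre.2.2.2.2.2.2.2
  have hok := hat.inv.heap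
  have hbase : Hc.base = 0x800000 := hat.region.1.trans henv.heap.base
  have hlimit : Hc.limit = 0xC00000 := hat.region.2.trans henv.heap.limit
  have hpvc : Fc.pv = F.pv := hat.sameBut.2.1
  have hcur := henv.ctx.cursor_range henv.heap.inv.shadow
  -- where pv is; the data object `(b, len)`: live, where it is
  obtain ⟨hpv1, hpv2, hpv3⟩ := hat.ok.pv_where hok hbase
  rw [hpvc] at hpv1 hpv2 hpv3
  have hpvlive : Hc.Live F.pv 24936 := by
    rw [← hpvc]
    exact hat.ok.pv_live
  obtain ⟨b, c_rbp⟩ : ∃ b, v.reg .rbp = b := ⟨_, rfl⟩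
  rw [c_rbp] at hdata
  have hblive : Hc.Live b.toNat len := hat.ok.owns.live _ (Fc.datas_owned _ hdata)
  obtain ⟨hb1, hb2⟩ := Heap.Live.range hbase hok hblive
  -- 2. the present state; `mov edx, r12d` is `Len`, zero-extended
  have hcpy := h_memcpy (Hc.liveObjs ++ rest) frames
  have w_rip := hat.rip
  have c_rsp : v.reg .rsp = e.reg .rsp - 56 := hat.rsp
  have c_r13 : v.reg .r13 = e.reg .r8 := hat.r13
  have c_r12 : v.reg .r12 = UInt64.ofNat len := by
    apply UInt64.toNat_inj.mp
    rw [hat.r12, toNat_ofNat_addr len (by omega)]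
  have w_eq : Mem.EqOn ProgX.Base.L.textLo ProgX.Base.L.textHi u₀.mem v.mem := ProgX.Base.conv_code_eqOn hat.code
  have hdf : v.flags .df = false := (show abiInv _ from hat.abi).1
  have hmx : v.mxcsr &&& 0x1F80 = 0x1F80 := (show abiInv _ from hat.abi).2
  have hsse := ProgX.Base.sseOK_of_abiInv hat.abi
  have w_kept : RegsKept [.rsp] v v := RegsKept.refl _ _
  have elen : (UInt64.ofNat len).toNat = len := toNat_ofNat_addr len (by omega)
  -- 3. the walk to the return of `memcpy`: both NULL tests fail
  u_walk hcode [hμ.vendor, cnt32_zext len (by omega)]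
    until [Gif.L.GifAddExtensionBlock.at_107c4d, Gif.L.GifAddExtensionBlock.ret11]
    span [ProgX.Base.L.textLo, ProgX.Base.L.textHi] side (v_side)
  case call_inv =>
    v_inv
  case pre_107c18 =>
    -- memcpy's precondition: the shadow clause over the pushed return address; source in pv, destination the data object
    have hp' : HeapPre Hc rest frames s_107c18 :=
      HeapPre.at_push henv.heap hat.region hat.inv w_rsp w_mem (by u_omega)
    refine ⟨hp'.shadowPre, Or.inr ⟨?_, ?_, ?_⟩⟩
    · -- the source: `[ExtData, ExtData + Len)` inside `pv.Buf`
      rw [w_rsi, w_rdx, elen]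
      exact hpvlive.liveIn rest frames (by omega) (by omega)
    · -- the destination: the whole data object
      rw [w_rdi, w_rdx, elen]
      exact hblive.liveIn rest frames (Nat.le_refl _) (Nat.le_refl _)
    · -- no overlap: pv and the data object are two owned objects (the disjunction lives in this bullet only)
      rw [w_rdi, w_rsi, w_rdx, elen]
      have hfar := hat.ok.data_far_pv hok hdata
      simp only at hfar
      rw [hpvc] at hfar
      omega
  -- 4. 107C1DH (ret11): `memcpy` has returned; what was written since the cut
  have hunc : ShadowUntouched s_107c18.mem s_107c18r.mem := w_post.2.1
  clear w_post
  have hun0 : ShadowUntouched v.mem s_107c18.mem := by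
    rw [w_mem_107c18]
    v_untouched
  have hun : ShadowUntouched v.mem s_107c18r.mem := hun0.trans hunc
  v_after_call w_rsp_107c18 w_mem_107c18
  simp only [w_rdi_107c18, w_rdx_107c18, elen] at w_same
  -- 88 bytes of stack below the body's stack pointer, the data object
  have hsameV : Mem.SameExcept
      [⟨(e.reg .rsp).toNat - 144, (e.reg .rsp).toNat - 56⟩,
       ⟨b.toNat, b.toNat + len⟩] v.mem s_107c18r.mem := by u_same
  -- 5. 107C1DH … 107C4DH: `eax = 1`
  u_walk hcode [hμ.vendor] until [Gif.L.GifAddExtensionBlock.at_107c4d]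
    span [ProgX.Base.L.textLo, ProgX.Base.L.textHi] side (v_side)
  have habi : (conv u₀).inv s_107c22 := by v_inv
  -- 6. 107C4DH: `Done`; the memory is that after `memcpy`
  rw [← w_mem] at hun hsameV
  -- the heap's invariant: the stack lies below the heap's region, the data object is live
  have hinv' : HeapInv Hc rest frames ((e.reg .rsp).toNat - 56) s_107c22.mem := by
    apply hat.inv.sameExcept hun hsameV
    intro y hy
    simp only [List.mem_cons, List.not_mem_nil, or_false] at hy
    rcases hy with hy | hy
    · subst hy
      left
      left
      rw [hbase]
      simp only
      omega
    · subst hy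
      exact HeapWin.live hok hblive (Nat.le_refl _) (Nat.le_refl _)
  -- the state invariant: the stack below the cursor and a data object are loose
  have hok' : GifOK Hc Fc R s_107c22.mem := by
    apply hat.ok.sameExcept hok ⟨hcur.1, hcur.2.1⟩ hsameV
    intro y hy
    simp only [List.mem_cons, List.not_mem_nil, or_false] at hy
    rcases hy with hy | hy
    · subst hy
      exact Loose.stack hok (by simp only; omega) (by simp only; omega) (by simp only; omega)
    · subst hy
      exact Loose.data hok hat.ok.owns hdata (Nat.le_refl _) (Nat.le_refl _)
  -- the function's frame: the seven slots, the contract's footprint, `rem`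
  have hframe := hat.frame_carry he_room he_top hcur hsameV (by
    intro y hy
    simp only [List.mem_cons, List.not_mem_nil, or_false] at hy
    rcases hy with hy | hy
    · subst hy
      left
      simp only
      omega
    · subst hy
      right
      simp only
      omega)
  obtain ⟨k15, k14, k13, k12, kbp, kbx, kra, ksame, krem⟩ := hframe
  refine ReachVia.done ⟨hat.entry, hat.pre, w_rip, w_rsp, ?_, k15, k14, k13, k12, kbp, kbx, kra, hat.region, hat.sameBut, hinv',
    hok', krem, ksame, ProgX.Base.conv_code_in w_eq, habi⟩
  -- GIF_OK
  left
  rw [w_rax]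
  decide

end Gif.Spec.GifAddExtensionBlock_3
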